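-- pv_equiv track=rewrite | github.com/stanantov/werd | solver.py | most_popular_letter
-- ===== SOURCE A (Python) =====
-- def most_popular_letter(position, possible_words):
--     letter_count = {}
--     for word in possible_words:
--         letter = word[position]
--         if letter in letter_count:
--             letter_count[letter] += 1
--         else:
--             letter_count[letter] = 1
--     return max(letter_count, key=letter_count.get)
-- ===== SOURCE B (Python) =====
-- def most_popular_letter(position, possible_words):
--     def winner(letters):
--         # recursive elimination: take the first letter, strip all its copies,
--         # its count is the drop in length; recurse on the remainder and keep
--         # the later winner only if strictly more frequent (so ties go to the
--         # earlier letter, matching insertion-order max).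
--         c = letters[0]
--         rest = [x for x in letters if x != c]
--         n = len(letters) - len(rest)
--         if not rest:
--             return (c, n)
--         d, m = winner(rest)
--         return (d, m) if m > n else (c, n)
--     return winner([w[position] for w in possible_words])[0]
-- ===== Notes on version B (the rewrite author's own statement) =====
-- stated objective: alternative
-- what changed: B drops A's frequency dictionary entirely: a recursive elimination takes the first letter, removes all its copies by filtering, obtains its count as the length drop, recurses on the remainder, and keeps the later winner only if strictly more frequent, which reproduces A's insertion-order tie-break.
import Mathlib
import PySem

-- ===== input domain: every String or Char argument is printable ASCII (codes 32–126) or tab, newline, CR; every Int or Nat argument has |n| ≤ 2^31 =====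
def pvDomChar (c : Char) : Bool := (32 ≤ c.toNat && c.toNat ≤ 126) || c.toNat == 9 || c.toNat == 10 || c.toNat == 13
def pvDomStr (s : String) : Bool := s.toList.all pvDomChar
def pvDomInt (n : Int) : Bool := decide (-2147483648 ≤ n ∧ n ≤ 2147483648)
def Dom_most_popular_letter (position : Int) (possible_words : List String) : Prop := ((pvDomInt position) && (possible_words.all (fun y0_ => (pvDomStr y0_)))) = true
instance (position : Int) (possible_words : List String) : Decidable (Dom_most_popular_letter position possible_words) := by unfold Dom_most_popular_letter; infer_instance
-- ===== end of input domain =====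

-- B replaces A's frequency-dictionary loop by recursive elimination: strip the first letter's copies, count it as the length drop, recurse on the remainder, keep the later winner only if strictly more frequent; objective: alternative.


-- ===== PORT A =====
-- one step of A's counting loop; the Option accumulator is none once word[position] raised IndexError
def pvStepA (position : Int) (acc : Option (PySem.Dict Char Int)) (word : String) : Option (PySem.Dict Char Int) :=
  match acc with
  | none => none
  | some d =>
    match PySem.Str.pyGet? word position with
    | none => none                           -- IndexError (outside Pre_)
    | some letter =>
      if d.contains letter then some (d.insert letter (d.getD letter 0 + 1))
      else some (d.insert letter 1)

def most_popular_letter (position : Int) (possible_words : List String) : String :=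
  match possible_words.foldl (pvStepA position) (some PySem.Dict.empty) with
  | none => ""                               -- IndexError (outside Pre_)
  | some d =>
    match PySem.List.max? d.keys (fun k => d.getD k 0) with   -- max(letter_count, key=letter_count.get)
    | none => ""                             -- ValueError: max of empty dict (outside Pre_)
    | some k => String.ofList [k]

-- ===== PORT B =====
-- Source B's inner 'winner': first letter c, rest = letters without c, count of c = length drop; recurse, later winner replaces only if strictly more frequent
def pvWinner (letters : List Char) : Char × Int :=
  match letters with
  | [] => (' ', 0)                           -- unreachable in Source B: letters[0] raises IndexError there (outside Pre_)
  | c :: t =>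
    let rest := (c :: t).filter (fun x => x ≠ c)
    let n : Int := ((c :: t).length : Int) - (rest.length : Int)
    if rest = [] then (c, n)
    else
      let p := pvWinner rest
      if p.2 > n then p else (c, n)
termination_by letters.length
decreasing_by
  have := List.length_filter_le (fun x => !decide (x = c)) t
  simp
  omega

def most_popular_letter_alt (position : Int) (possible_words : List String) : String :=
  let letters := possible_words.filterMap (fun w => PySem.Str.pyGet? w position)  -- [w[position] for w in possible_words]; exact under Pre_ (no index fails there)
  String.ofList [(pvWinner letters).1]

-- ===== PRECONDITION & SPEC =====
-- Pre_ excludes exactly the inputs where A raises: the empty list (max of an empty dict, ValueError) and any position out of range for some word (IndexError).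
def Pre_most_popular_letter (position : Int) (possible_words : List String) : Prop :=
  possible_words ≠ [] ∧ ∀ w ∈ possible_words, -(w.toList.length : Int) ≤ position ∧ position < (w.toList.length : Int)
instance (position : Int) (possible_words : List String) : Decidable (Pre_most_popular_letter position possible_words) := by unfold Pre_most_popular_letter; infer_instance
def pvWitness_most_popular_letter : Int × List String := (0, ["ab", "cd", "ad"])
def Spec_most_popular_letter (position : Int) (possible_words : List String) (out : String) : Prop := out = most_popular_letter_alt position possible_words
instance (position : Int) (possible_words : List String) (out : String) : Decidable (Spec_most_popular_letter position possible_words out) := by unfold Spec_most_popular_letter; infer_instance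

-- ===== CLAIM (what is proved, stated in full; the proofs are below) =====
def Claim_equal_most_popular_letter : Prop := ∀ (position : Int) (possible_words : List String), Dom_most_popular_letter position possible_words → Pre_most_popular_letter position possible_words → Spec_most_popular_letter position possible_words (most_popular_letter position possible_words)

-- ===== LEMMAS AND PROOFS =====

-- A's per-word update equals Counter's update
theorem pvStepA_eq_modify (d : PySem.Dict Char Int) (c : Char) :
    (if d.contains c then some (d.insert c (d.getD c 0 + 1)) else some (d.insert c 1))
      = some (d.modify c 0 (· + 1)) := by
  by_cases h : d.contains c = true
  · simp [h, PySem.Dict.modify]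
  · have hf : d.contains c = false := by simpa using h
    have h0 : d.getD c 0 = 0 := PySem.Dict.getD_of_not_contains d 0 hf
    simp [h, PySem.Dict.modify, h0]

-- A's loop builds Counter(letters) when no index raises
theorem pvFoldA (position : Int) (ws : List String) (d : PySem.Dict Char Int)
    (h : ∀ w ∈ ws, (PySem.Str.pyGet? w position).isSome) :
    ws.foldl (pvStepA position) (some d)
      = some ((ws.filterMap (fun w => PySem.Str.pyGet? w position)).foldl
          (fun d c => d.modify c 0 (· + 1)) d) := by
  induction ws generalizing d with
  | nil => simp
  | cons w ws ih =>
    obtain ⟨c, hc⟩ := Option.isSome_iff_exists.mp (h w (by simp))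
    have hrest : ∀ w' ∈ ws, (PySem.Str.pyGet? w' position).isSome := fun w' hw' => h w' (by simp [hw'])
    simp only [List.foldl_cons, List.filterMap_cons, hc, pvStepA]
    rw [pvStepA_eq_modify, ih _ hrest]


def pvStep {α : Type} (key : α → Int) (acc : Option α) (x : α) : Option α :=
  match acc with
  | none => some x
  | some m => if key m < key x then some x else some m

def pvCombine {α : Type} (key : α → Int) (a : α) (o : Option α) : Option α :=
  match o with
  | none => some a
  | some d => if key a < key d then some d else some a

theorem pvStep_none {α : Type} (key : α → Int) (x : α) : pvStep key none x = some x := rfl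
theorem pvStep_some {α : Type} (key : α → Int) (m x : α) :
    pvStep key (some m) x = if key m < key x then some x else some m := rfl
theorem pvCombine_none {α : Type} (key : α → Int) (a : α) : pvCombine key a none = some a := rfl
theorem pvCombine_some {α : Type} (key : α → Int) (a d : α) :
    pvCombine key a (some d) = if key a < key d then some d else some a := rfl

theorem pvFold_combine {α : Type} (key : α → Int) (t : List α) :
    ∀ (a : α), t.foldl (pvStep key) (some a) = pvCombine key a (t.foldl (pvStep key) none) := by
  induction t with
  | nil => intro a; rfl
  | cons x t ih =>
    intro a
    simp only [List.foldl_cons, pvStep_none, pvStep_some]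
    rw [ih x]
    by_cases hax : key a < key x
    · rw [if_pos hax, ih x]
      cases hmt : t.foldl (pvStep key) none with
      | none => simp [pvCombine_none, pvCombine_some, hax]
      | some d =>
        rw [pvCombine_some]
        by_cases hxd : key x < key d
        · rw [if_pos hxd, pvCombine_some, if_pos (by omega : key a < key d)]
        · rw [if_neg hxd, pvCombine_some, if_pos hax]
    · rw [if_neg hax, ih a]
      cases hmt : t.foldl (pvStep key) none with
      | none => simp [pvCombine_none, pvCombine_some, hax]
      | some d =>
        rw [pvCombine_some, pvCombine_some]
        by_cases hxd : key x < key d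
        · rw [if_pos hxd, pvCombine_some]
        · rw [if_neg hxd, pvCombine_some, if_neg hax,
              if_neg (by omega : ¬ key a < key d)]

theorem pvMax_cons {α : Type} (key : α → Int) (a : α) (xs : List α) :
    PySem.List.max? (a :: xs) key = pvCombine key a (PySem.List.max? xs key) := by
  have h1 : PySem.List.max? (a :: xs) key = xs.foldl (pvStep key) (some a) := rfl
  have h2 : PySem.List.max? xs key = xs.foldl (pvStep key) none := rfl
  rw [h1, h2, pvFold_combine]

theorem pvFoldAdd_filter (c : Char) (t : List Char) (s : PySem.Set Char)
    (hc : PySem.Set.contains s c = true) :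
    t.foldl PySem.Set.add s = (t.filter (fun x => x ≠ c)).foldl PySem.Set.add s := by
  induction t generalizing s with
  | nil => rfl
  | cons x t ih =>
    by_cases hx : x = c
    · subst hx
      have hadd : PySem.Set.add s x = s := by unfold PySem.Set.add; rw [if_pos hc]
      have hf : (x :: t).filter (fun y => y ≠ x) = t.filter (fun y => y ≠ x) := by simp
      rw [List.foldl_cons, hadd, hf]
      exact ih s hc
    · have hcont : PySem.Set.contains (PySem.Set.add s x) c = true := by
        unfold PySem.Set.add
        split_ifs with h
        · exact hc
        · simp only [PySem.Set.contains, List.contains_eq_mem, List.mem_append] at hc ⊢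
          simp at hc ⊢
          exact Or.inl hc
      have hf : (x :: t).filter (fun y => y ≠ c) = x :: t.filter (fun y => y ≠ c) := by
        simp [hx]
      rw [hf, List.foldl_cons, List.foldl_cons]
      exact ih _ hcont

theorem pvFoldAdd_cons (c : Char) (l : List Char) (s : PySem.Set Char)
    (h : ∀ x ∈ l, x ≠ c) :
    l.foldl PySem.Set.add (c :: s) = c :: l.foldl PySem.Set.add s := by
  induction l generalizing s with
  | nil => rfl
  | cons x l ih =>
    have hx : x ≠ c := h x (by simp)
    have hcont : PySem.Set.contains (c :: s) x = PySem.Set.contains s x := by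
      simp [PySem.Set.contains, List.contains_eq_mem, hx]
    have hstep : PySem.Set.add (c :: s) x = c :: PySem.Set.add s x := by
      simp only [PySem.Set.add, hcont]
      split_ifs with hs
      · rfl
      · rfl
    simp only [List.foldl_cons, hstep]
    exact ih _ (fun y hy => h y (by simp [hy]))

theorem pvOfList_cons (c : Char) (t : List Char) :
    PySem.Set.ofList (c :: t) = c :: PySem.Set.ofList (t.filter (fun x => x ≠ c)) := by
  have h1 : PySem.Set.ofList (c :: t) = t.foldl PySem.Set.add [c] := by
    simp [PySem.Set.ofList, PySem.Set.add, PySem.Set.empty, PySem.Set.contains]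
  rw [h1, pvFoldAdd_filter c t [c] (by simp [PySem.Set.contains])]
  have h2 : ([c] : PySem.Set Char) = c :: ([] : List Char) := rfl
  rw [h2, pvFoldAdd_cons c _ []
    (fun x hx => by simpa using (List.mem_filter.mp hx).2)]
  rfl

-- Python-max's key only matters on the elements of the list
theorem pvMax_congr {α : Type} (xs : List α) (k1 k2 : α → Int)
    (h : ∀ x ∈ xs, k1 x = k2 x) :
    PySem.List.max? xs k1 = PySem.List.max? xs k2 := by
  induction xs with
  | nil => rfl
  | cons x t ih =>
    rw [pvMax_cons, pvMax_cons, ih (fun y hy => h y (List.mem_cons_of_mem x hy))]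
    cases hmt : PySem.List.max? t k2 with
    | none => rfl
    | some d =>
      have hd : d ∈ t := PySem.List.max?_mem hmt
      rw [pvCombine_some, pvCombine_some, h x (by simp), h d (List.mem_cons_of_mem x hd)]

-- count of the eliminated letter = the length drop
theorem pvCount_len (ls : List Char) (c : Char) :
    (ls.filter (fun x => x ≠ c)).length + ls.count c = ls.length := by
  induction ls with
  | nil => rfl
  | cons x t ih =>
    by_cases hx : x = c
    · subst hx
      simp [← ih]
      omega
    · simp [hx, ← ih]
      omega

-- MAIN INVARIANT: Source B's winner returns A's maximum together with its count
theorem pvWinner_max : ∀ (fuel : Nat) (ls : List Char), ls.length ≤ fuel → ls ≠ [] →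
    ∃ m, PySem.List.max? (PySem.Set.ofList ls) (fun x => (ls.count x : Int)) = some m ∧
      pvWinner ls = (m, (ls.count m : Int)) := by
  intro fuel
  induction fuel with
  | zero =>
    intro ls hlen hne
    cases ls with
    | nil => exact absurd rfl hne
    | cons c t => simp at hlen
  | succ fuel ih =>
    intro ls hlen hne
    cases ls with
    | nil => exact absurd rfl hne
    | cons c t =>
      have hfilter : (c :: t).filter (fun x => x ≠ c) = t.filter (fun x => x ≠ c) := by
        simp
      have hcnt : ((c :: t).length : Int) - (((c :: t).filter (fun x => x ≠ c)).length : Int)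
          = ((c :: t).count c : Int) := by
        have := pvCount_len (c :: t) c
        omega
      rw [pvWinner]
      simp only []
      by_cases hrest : (c :: t).filter (fun x => x ≠ c) = []
      · -- every letter equals c
        rw [if_pos hrest]
        refine ⟨c, ?_, by rw [hcnt]⟩
        have h0 : t.filter (fun x => x ≠ c) = [] := by rw [← hfilter]; exact hrest
        rw [pvOfList_cons, h0]
        rfl
      · rw [if_neg hrest]
        have hlen' : ((c :: t).filter (fun x => x ≠ c)).length ≤ fuel := by
          rw [hfilter]
          have := List.length_filter_le (fun x => decide ¬(x = c)) t
          simp only [List.length_cons] at hlen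
          simp only [decide_not] at this ⊢
          omega
        obtain ⟨d, hdmax, hdwin⟩ := ih _ hlen' hrest
        set rest := (c :: t).filter (fun x => x ≠ c) with hrestdef
        have hmemne : ∀ x ∈ PySem.Set.ofList rest, x ≠ c := by
          intro x hx
          have := (PySem.Set.mem_ofList rest x).mp hx
          simpa using (List.mem_filter.mp this).2
        have hkeq : ∀ x ∈ PySem.Set.ofList rest, (rest.count x : Int) = ((c :: t).count x : Int) := by
          intro x hx
          have hxc : x ≠ c := hmemne x hx
          have : rest.count x = (c :: t).count x :=
            List.count_filter (by simpa using hxc)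
          exact_mod_cast this
        have hdmem : d ∈ PySem.Set.ofList rest := PySem.List.max?_mem hdmax
        have hdc : d ≠ c := hmemne d hdmem
        have hdcount : (rest.count d : Int) = ((c :: t).count d : Int) := hkeq d hdmem
        have hmax2 : PySem.List.max? (PySem.Set.ofList rest) (fun x => ((c :: t).count x : Int)) = some d := by
          rw [← pvMax_congr _ _ _ hkeq]; exact hdmax
        have hof : PySem.Set.ofList (c :: t) = c :: PySem.Set.ofList rest := by
          rw [pvOfList_cons, hfilter]
        rw [hof, pvMax_cons, hmax2, pvCombine_some]
        simp only [hdwin, hcnt]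
        by_cases hgt : ((c :: t).count c : Int) < ((c :: t).count d : Int)
        · refine ⟨d, by rw [if_pos hgt], ?_⟩
          rw [if_pos (by omega : (rest.count d : Int) > ((c :: t).count c : Int))]
          rw [hdcount]
        · refine ⟨c, by rw [if_neg hgt], ?_⟩
          rw [if_neg (by omega : ¬ (rest.count d : Int) > ((c :: t).count c : Int))]

-- ===== VERDICT (by name: the statement is the Claim_ definition above) =====
theorem most_popular_letter_spec : Claim_equal_most_popular_letter := by
  intro position possible_words _ hpre
  obtain ⟨hne, hrange⟩ := hpre
  have hsome : ∀ w ∈ possible_words, (PySem.Str.pyGet? w position).isSome := by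
    intro w hw
    apply Option.isSome_iff_ne_none.mpr
    intro hn
    have hn' : PySem.List.pyGet? w.toList position = none := by
      simpa [PySem.Str.pyGet?, PySem.Chars.pyGet?] using hn
    exact ((PySem.List.pyGet?_eq_none_iff _ _).mp hn') ⟨(hrange w hw).1, (hrange w hw).2⟩
  set letters := possible_words.filterMap (fun w => PySem.Str.pyGet? w position) with hl
  have hlne : letters ≠ [] := by
    cases possible_words with
    | nil => exact absurd rfl hne
    | cons w ws =>
      obtain ⟨c, hc⟩ := Option.isSome_iff_exists.mp (hsome w (by simp))
      intro h0
      rw [hl, List.filterMap_cons, hc] at h0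
      simp at h0
  have hcounter : possible_words.foldl (pvStepA position) (some PySem.Dict.empty)
      = some (PySem.Dict.counter letters) := by
    rw [pvFoldA position possible_words PySem.Dict.empty hsome, PySem.Dict.counter_eq_foldl]
  have hkeyfun : (fun k => (PySem.Dict.counter letters).getD k 0)
      = fun k => ((letters.count k : Int)) := by
    funext k
    exact PySem.Dict.getD_counter letters k
  obtain ⟨m, hmax, hwin⟩ := pvWinner_max letters.length letters (le_refl _) hlne
  unfold Spec_most_popular_letter most_popular_letter most_popular_letter_alt
  rw [hcounter]
  simp only [← hl, hkeyfun, PySem.Dict.keys_counter, hmax, hwin]
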